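-- pv_equiv track=rewrite | github.com/instantOne/PythonAlgorithms | lessons/Exam/4Test.py | max_boring_prefix
-- ===== SOURCE A (Python) =====
-- def max_boring_prefix(n, a):
--     counts = {}
--     freqs = {}
--     left = 0
--     max_len = 0
--
--     for right in range(n):
--         x = a[right]
--         counts[x] = counts.get(x, 0) + 1
--
--         count_x = counts[x]
--         freqs[count_x] = freqs.get(count_x, 0) + 1
--         freqs[count_x - 1] = freqs.get(count_x - 1, 0) - 1
--
--         while freqs and freqs[min(freqs)] == 0:
--             del freqs[min(freqs)]
--         max_freq = max(freqs)
--         min_freq = min(freqs)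
--
--         if max_freq == 1 or (max_freq == min_freq + 1 and freqs[max_freq] == 1):
--             max_len = max(max_len, right - left + 1)
--         else:
--             counts[a[left]] -= 1
--             if counts[a[left]] == 0:
--                 del counts[a[left]]
--             freqs[counts.get(a[left], 0)] -= 1
--             freqs[counts.get(a[left], 0) + 1] += 1
--             left += 1
--
--     return max_len
-- ===== SOURCE B (Python) =====
-- def max_boring_prefix(n, a):
--     # A's frequency-of-frequency bookkeeping collapses: its `freqs[0]` entry is created
--     # at -1 and only ever decremented, so min(freqs) is always 0 with a nonzero value,
--     # the cleanup loop never fires, and the window test is simply "no duplicate seen yet".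
--     # Hence the result is the length of the longest all-distinct prefix.
--     seen = set()
--     for i in range(n):
--         if a[i] in seen:
--             return i
--         seen.add(a[i])
--     return max(n, 0)
-- ===== Notes on version B (the rewrite author's own statement) =====
-- stated objective: faster
-- what changed: A's sliding-window freq-of-freq bookkeeping provably reduces to 'length of the longest all-distinct prefix' (its freqs[0] entry stays negative, so min(freqs)=0 always and the window test is just 'no duplicate yet'); B is a single hash-set scan that stops at the first duplicate.
import Mathlib
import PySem

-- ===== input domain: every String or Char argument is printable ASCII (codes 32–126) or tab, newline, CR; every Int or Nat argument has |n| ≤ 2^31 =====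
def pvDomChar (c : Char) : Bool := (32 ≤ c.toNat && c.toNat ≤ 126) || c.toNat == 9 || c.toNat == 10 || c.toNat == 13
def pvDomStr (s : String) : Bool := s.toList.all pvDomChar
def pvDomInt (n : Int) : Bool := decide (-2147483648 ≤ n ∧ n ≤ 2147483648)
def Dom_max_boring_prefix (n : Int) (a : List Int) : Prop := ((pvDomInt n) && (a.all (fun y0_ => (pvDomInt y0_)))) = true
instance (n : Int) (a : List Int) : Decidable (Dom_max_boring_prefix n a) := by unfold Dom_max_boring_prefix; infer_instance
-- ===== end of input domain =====

-- B replaces A's sliding-window frequency-of-frequency bookkeeping (whose window test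
-- provably collapses to "no duplicate seen yet") by a single hash-set scan stopping at
-- the first duplicate.

-- ===== PORT A =====

structure MBPState where
  counts : PySem.Dict Int Int
  freqs : PySem.Dict Int Int
  left : Int
  maxLen : Int
deriving Repr, DecidableEq

-- min(freqs): Python's min over the dict's keys
def mbpMinKey (d : PySem.Dict Int Int) : Int := (PySem.List.min? d.keys (fun k => k)).getD 0
-- max(freqs)
def mbpMaxKey (d : PySem.Dict Int Int) : Int := (PySem.List.max? d.keys (fun k => k)).getD 0

theorem mbp_erase_size_lt (d : PySem.Dict Int Int) (k : Int) (hk : k ∈ d.keys) :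
    (d.erase k).size < d.size := by
  obtain ⟨items⟩ := d
  simp only [PySem.Dict.erase, PySem.Dict.size]
  apply List.length_filter_lt_length_iff_exists.mpr
  simp only [PySem.Dict.keys, List.mem_map] at hk
  obtain ⟨p, hp, hpk⟩ := hk
  exact ⟨p, hp, by simp [hpk]⟩

-- 'while freqs and freqs[min(freqs)] == 0: del freqs[min(freqs)]'
def mbpCleanup (freqs : PySem.Dict Int Int) : PySem.Dict Int Int :=
  if h : freqs.size ≠ 0 ∧ freqs.getD (mbpMinKey freqs) 0 = 0 then
    mbpCleanup (freqs.erase (mbpMinKey freqs))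
  else freqs
termination_by freqs.size
decreasing_by
  apply mbp_erase_size_lt
  have hne : freqs.keys ≠ [] := by
    intro hnil
    obtain ⟨items⟩ := freqs
    simp only [PySem.Dict.keys] at hnil
    simp only [PySem.Dict.size, List.map_eq_nil_iff.mp hnil, List.length_nil] at h
    exact h.1 rfl
  cases hmin : PySem.List.min? freqs.keys (fun k => k) with
  | none => exact absurd ((PySem.List.min?_eq_none_iff _ _).mp hmin) hne
  | some m =>
    have := PySem.List.min?_mem hmin
    simpa [mbpMinKey, hmin] using this

-- the else-branch of the loop body (shrink the window by one)
def mbpShrink (a : List Int) (counts0 freqs0 : PySem.Dict Int Int) (left maxLen : Int) : MBPState :=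
  let y := (PySem.List.pyGet? a left).getD 0             -- a[left]; in range on reachable states
  let counts := counts0.insert y (counts0.getD y 0 - 1)  -- counts[a[left]] -= 1 (key present on reachable states)
  let counts := if counts.getD y 0 = 0 then counts.erase y else counts
  let freqs := freqs0.insert (counts.getD y 0) (freqs0.getD (counts.getD y 0) 0 - 1)
  let freqs := freqs.insert (counts.getD y 0 + 1) (freqs.getD (counts.getD y 0 + 1) 0 + 1)
  ⟨counts, freqs, left + 1, maxLen⟩

-- one iteration of 'for right in range(n)'
def mbpStep (a : List Int) (s : MBPState) (right : Int) : MBPState :=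
  let x := (PySem.List.pyGet? a right).getD 0            -- a[right]; in range under Pre_
  let counts := s.counts.insert x (s.counts.getD x 0 + 1)
  let count_x := counts.getD x 0
  let freqs := s.freqs.insert count_x (s.freqs.getD count_x 0 + 1)
  let freqs := freqs.insert (count_x - 1) (freqs.getD (count_x - 1) 0 - 1)
  let freqs := mbpCleanup freqs
  if mbpMaxKey freqs = 1 ∨ (mbpMaxKey freqs = mbpMinKey freqs + 1 ∧ freqs.getD (mbpMaxKey freqs) 0 = 1) then
    { counts := counts, freqs := freqs, left := s.left,
      maxLen := max s.maxLen (right - s.left + 1) }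
  else mbpShrink a counts freqs s.left s.maxLen

def max_boring_prefix (n : Int) (a : List Int) : Int :=
  ((PySem.List.pyRange 0 n 1).foldl (mbpStep a)
    ⟨PySem.Dict.empty, PySem.Dict.empty, 0, 0⟩).maxLen

-- ===== PORT B =====

-- 'for i in range(n): if a[i] in seen: return i; seen.add(a[i])' / 'return max(n, 0)'
def mbpAltGo (n : Int) (a : List Int) (seen : PySem.Set Int) (i : Int) : Int :=
  if i < n then
    let x := (PySem.List.pyGet? a i).getD 0
    if PySem.Set.contains seen x then i
    else mbpAltGo n a (PySem.Set.add seen x) (i + 1)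
  else max n 0
termination_by (n - i).toNat
decreasing_by omega

def max_boring_prefix_alt (n : Int) (a : List Int) : Int :=
  mbpAltGo n a PySem.Set.empty 0

-- ===== PRECONDITION & SPEC =====
-- A indexes a[right] for every right in range(n), so it raises IndexError whenever n > len(a).
def Pre_max_boring_prefix (n : Int) (a : List Int) : Prop := n ≤ (a.length : Int)
instance (n : Int) (a : List Int) : Decidable (Pre_max_boring_prefix n a) := by
  unfold Pre_max_boring_prefix; infer_instance

def pvWitness_max_boring_prefix : Int × List Int := (3, [1, 2, 1])

def Spec_max_boring_prefix (n : Int) (a : List Int) (out : Int) : Prop :=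
  out = max_boring_prefix_alt n a
instance (n : Int) (a : List Int) (out : Int) : Decidable (Spec_max_boring_prefix n a out) := by
  unfold Spec_max_boring_prefix; infer_instance

-- ===== CLAIM (what is proved, stated in full; the proofs are below) =====
def Claim_equal_max_boring_prefix : Prop := ∀ (n : Int) (a : List Int), Dom_max_boring_prefix n a → Pre_max_boring_prefix n a → Spec_max_boring_prefix n a (max_boring_prefix n a)

-- ===== LEMMAS AND PROOFS =====

theorem mbp_find_filter (t : List (Int × Int)) (k v : Int) :
    List.find? (fun p => p.1 == v) (t.filter (fun p => !(p.1 == k))) =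
      if v = k then none else List.find? (fun p => p.1 == v) t := by
  induction t with
  | nil => simp
  | cons p t ih =>
    by_cases hpk : p.1 = k <;> by_cases hpv : p.1 = v <;> by_cases hvk : v = k <;>
      simp_all [List.filter_cons, List.find?_cons]

theorem mbp_get?_erase (d : PySem.Dict Int Int) (k v : Int) :
    (d.erase k).get? v = if v = k then none else d.get? v := by
  obtain ⟨items⟩ := d
  simp only [PySem.Dict.erase, PySem.Dict.get?, mbp_find_filter]
  split <;> simp

theorem mbp_getD_erase (d : PySem.Dict Int Int) (k v : Int) :
    (d.erase k).getD v 0 = if v = k then 0 else d.getD v 0 := by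
  simp only [PySem.Dict.getD, mbp_get?_erase]
  split <;> simp

theorem mbp_mem_keys_of_getD_ne (d : PySem.Dict Int Int) (k : Int) (h : d.getD k 0 ≠ 0) :
    k ∈ d.keys := by
  by_cases hc : d.contains k = true
  · exact (PySem.Dict.contains_iff_mem_keys d k).mp hc
  · exact absurd (PySem.Dict.getD_of_not_contains d 0 (by simpa using hc)) h

theorem mbp_min?_eq_zero (ks : List Int) (h0 : (0 : Int) ∈ ks) (hpos : ∀ k ∈ ks, 0 ≤ k) :
    PySem.List.min? ks (fun k => k) = some 0 := by
  cases hmin : PySem.List.min? ks (fun k => k) with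
  | none => simp_all [(PySem.List.min?_eq_none_iff ks (fun k => k)).mp hmin]
  | some m =>
    have hm := PySem.List.min?_mem hmin
    have h1 := PySem.List.min?_isMin hmin 0 h0
    have h2 := hpos m hm
    simp only [Option.some.injEq]
    omega

theorem mbp_maxKey_ge_two (d : PySem.Dict Int Int) (k : Int) (hk : k ∈ d.keys) (h2 : 2 ≤ k) :
    2 ≤ mbpMaxKey d := by
  cases hmax : PySem.List.max? d.keys (fun k => k) with
  | none => simp_all [(PySem.List.max?_eq_none_iff d.keys (fun k => k)).mp hmax]
  | some m =>
    have h1 := PySem.List.max?_isMax hmax k hk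
    simp only [mbpMaxKey, hmax, Option.getD_some]
    omega

theorem mbp_minKey_eq_zero (d : PySem.Dict Int Int) (h0 : d.getD 0 0 ≠ 0)
    (hpos : ∀ k ∈ d.keys, 0 ≤ k) : mbpMinKey d = 0 := by
  have hmem : (0 : Int) ∈ d.keys := mbp_mem_keys_of_getD_ne d 0 h0
  simp [mbpMinKey, mbp_min?_eq_zero d.keys hmem hpos]

theorem mbp_cleanup_noop (d : PySem.Dict Int Int) (h0 : d.getD 0 0 < 0)
    (hpos : ∀ k ∈ d.keys, 0 ≤ k) : mbpCleanup d = d := by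
  rw [mbpCleanup, dif_neg]
  rintro ⟨-, h2⟩
  rw [mbp_minKey_eq_zero d (by omega) hpos] at h2
  omega

-- window: elements a[l..r-1] are (a.take r).drop l
theorem mbp_count_window_succ (a : List Int) (l r : Nat) (hl : l ≤ r) (hr : r < a.length) (v : Int) :
    ((a.take (r+1)).drop l).count v = ((a.take r).drop l).count v + (if a[r] = v then 1 else 0) := by
  have ht : a.take (r+1) = a.take r ++ [a[r]] := by
    rw [List.take_succ]
    simp [List.getElem?_eq_getElem hr]
  rw [ht, List.drop_append_of_le_length (by simp; omega), List.count_append]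
  by_cases hv : a[r] = v
  · simp [hv]
  · simp [hv, List.count_eq_zero]

theorem mbp_count_drop_succ (xs : List Int) (l : Nat) (h : l < xs.length) (v : Int) :
    (xs.drop l).count v = (if xs[l] = v then 1 else 0) + (xs.drop (l+1)).count v := by
  rw [List.drop_eq_getElem_cons h, List.count_cons]
  by_cases hv : xs[l] = v <;> simp [hv] <;> omega

-- the phase-2 invariant: once a duplicate has entered, freqs[0] < 0, all keys ≥ 0,
-- some key ≥ 2, and counts is the multiset of the window a[left..r-1]
def MBPInv (a : List Int) (s : MBPState) (r : Int) : Prop :=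
  ∃ l : Nat, s.left = (l : Int) ∧ (l : Int) ≤ r ∧
    (∀ v : Int, s.counts.getD v 0 = (((a.take r.toNat).drop l).count v : Int)) ∧
    (∀ k ∈ s.freqs.keys, 0 ≤ k) ∧ s.freqs.getD 0 0 < 0 ∧ (∃ k ∈ s.freqs.keys, 2 ≤ k)

theorem mbp_shrink2 (a : List Int) (c f : PySem.Dict Int Int) (l r : Nat) (ml : Int)
    (hlr : l ≤ r) (hrlen : r < a.length)
    (hcount : ∀ v : Int, c.getD v 0 = (((a.take (r+1)).drop l).count v : Int))
    (hkeys : ∀ k ∈ f.keys, 0 ≤ k) (h00 : f.getD 0 0 < 0) (hk2 : ∃ k ∈ f.keys, 2 ≤ k) :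
    (mbpShrink a c f (l : Int) ml).maxLen = ml ∧
      MBPInv a (mbpShrink a c f (l : Int) ml) ((r : Int) + 1) := by
  obtain ⟨k2, hk2mem, hk2ge⟩ := hk2
  have hllen : l < a.length := by omega
  have hltake : l < (a.take (r+1)).length := by rw [List.length_take]; omega
  have hgetl : (a.take (r+1))[l]'hltake = a[l] := List.getElem_take
  have hy : (PySem.List.pyGet? a (l : Int)).getD 0 = a[l] := by
    rw [PySem.List.pyGet?_natCast]
    simp [List.getElem?_eq_getElem hllen]
  have hsplit : ∀ v : Int, ((a.take (r+1)).drop l).count v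
      = (if a[l] = v then 1 else 0) + ((a.take (r+1)).drop (l+1)).count v := by
    intro v
    rw [mbp_count_drop_succ _ l hltake v, hgetl]
  have hymem : 1 ≤ ((a.take (r+1)).drop l).count (a[l]) := by
    rw [hsplit]; simp
  simp only [mbpShrink, hy]
  set c1 := c.insert (a[l]) (c.getD (a[l]) 0 - 1) with hc1
  have hc1v : ∀ v : Int, c1.getD v 0
      = if v = a[l] then (((a.take (r+1)).drop l).count (a[l]) : Int) - 1
        else (((a.take (r+1)).drop l).count v : Int) := by
    intro v
    simp only [hc1, PySem.Dict.getD_insert, hcount]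
  set c2 := if c1.getD (a[l]) 0 = 0 then c1.erase (a[l]) else c1 with hc2
  have hc2v : ∀ v : Int, c2.getD v 0
      = if v = a[l] then (((a.take (r+1)).drop l).count (a[l]) : Int) - 1
        else (((a.take (r+1)).drop l).count v : Int) := by
    intro v
    rw [hc2]
    by_cases h : c1.getD (a[l]) 0 = 0
    · rw [if_pos h, mbp_getD_erase]
      have h' : (((a.take (r+1)).drop l).count (a[l]) : Int) - 1 = 0 := by
        rw [hc1v (a[l])] at h
        simpa using h
      by_cases hv : v = a[l]
      · subst hv
        simp
        omega
      · rw [if_neg hv, if_neg hv, hc1v v, if_neg hv]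
    · rw [if_neg h]
      exact hc1v v
  have hc2win : ∀ v : Int, c2.getD v 0 = (((a.take (r+1)).drop (l+1)).count v : Int) := by
    intro v
    have h1 := hsplit v
    rw [hc2v v]
    by_cases hv : v = a[l]
    · rw [hv] at h1 ⊢
      simp at h1 ⊢
      omega
    · simp only [if_neg hv]
      rw [if_neg (fun h => hv h.symm)] at h1
      omega
  have hm : c2.getD (a[l]) 0 = (((a.take (r+1)).drop l).count (a[l]) : Int) - 1 := by
    rw [hc2v]; simp
  have hm0 : 0 ≤ c2.getD (a[l]) 0 := by
    rw [hm]; push_cast; omega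
  set m := c2.getD (a[l]) 0 with hmdef
  set f1 := f.insert m (f.getD m 0 - 1) with hf1
  set f2 := f1.insert (m + 1) (f1.getD (m + 1) 0 + 1) with hf2
  constructor
  · trivial
  · unfold MBPInv
    refine ⟨l + 1, by push_cast; ring_nf, by push_cast; omega, ?_, ?_, ?_, ?_⟩
    · intro v
      have hcast : ((r : Int) + 1).toNat = r + 1 := by omega
      rw [hcast]
      exact hc2win v
    · intro k hk
      rw [hf2] at hk
      rcases (PySem.Dict.mem_keys_insert _ _ _ _).mp hk with h | hk
      · omega
      · rw [hf1] at hk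
        rcases (PySem.Dict.mem_keys_insert _ _ _ _).mp hk with h | hk
        · omega
        · exact hkeys k hk
    · simp only [hf2, hf1, PySem.Dict.getD_insert]
      rw [if_neg (by omega)]
      by_cases hm00 : (0 : Int) = m
      · rw [if_pos hm00, ← hm00]
        omega
      · rw [if_neg hm00]
        exact h00
    · refine ⟨k2, ?_, hk2ge⟩
      rw [hf2]
      refine (PySem.Dict.mem_keys_insert _ _ _ _).mpr (Or.inr ?_)
      rw [hf1]
      exact (PySem.Dict.mem_keys_insert _ _ _ _).mpr (Or.inr hk2mem)

theorem mbp_step2 (a : List Int) (r : Int) (s : MBPState)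
    (h0 : 0 ≤ r) (hr : r < (a.length : Int)) (hInv : MBPInv a s r) :
    (mbpStep a s r).maxLen = s.maxLen ∧ MBPInv a (mbpStep a s r) (r + 1) := by
  obtain ⟨l, hl, hlr, hcount, hkeys, h00, k2, hk2mem, hk2ge⟩ := hInv
  have hrlen : r.toNat < a.length := by omega
  have hlr' : l ≤ r.toNat := by omega
  have hx : (PySem.List.pyGet? a r).getD 0 = a[r.toNat] := by
    rw [PySem.List.pyGet?_eq_some_getElem a h0 hr]
    rfl
  simp only [mbpStep, hx, hl]
  set x := a[r.toNat] with hxdef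
  set c1 := s.counts.insert x (s.counts.getD x 0 + 1) with hc1
  have hc1v : ∀ v : Int, c1.getD v 0
      = (((a.take r.toNat).drop l).count v : Int) + (if v = x then 1 else 0) := by
    intro v
    simp only [hc1, PySem.Dict.getD_insert, hcount]
    split <;> [skip; skip] <;> first | rfl | (rename_i hv; simp [hv])
  have hc1win : ∀ v : Int, c1.getD v 0 = (((a.take (r.toNat + 1)).drop l).count v : Int) := by
    intro v
    rw [hc1v v, mbp_count_window_succ a l r.toNat hlr' hrlen v]
    push_cast
    by_cases hv : v = x
    · have h2 : a[r.toNat] = v := hv.symm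
      rw [if_pos hv, if_pos h2]
    · have h2 : ¬ a[r.toNat] = v := fun h => hv h.symm
      rw [if_neg hv, if_neg h2]
  set cx := c1.getD x 0 with hcx
  have hcx1 : 1 ≤ cx := by
    rw [hcx, hc1v x]
    simp
    try omega
  set f1 := s.freqs.insert cx (s.freqs.getD cx 0 + 1) with hf1
  set f2 := f1.insert (cx - 1) (f1.getD (cx - 1) 0 - 1) with hf2
  have hkeys2 : ∀ k ∈ f2.keys, 0 ≤ k := by
    intro k hk
    rw [hf2] at hk
    rcases (PySem.Dict.mem_keys_insert _ _ _ _).mp hk with h | hk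
    · omega
    · rw [hf1] at hk
      rcases (PySem.Dict.mem_keys_insert _ _ _ _).mp hk with h | hk
      · omega
      · exact hkeys k hk
  have h002 : f2.getD 0 0 < 0 := by
    simp only [hf2, hf1, PySem.Dict.getD_insert]
    by_cases hcx0 : cx = 1
    · rw [hcx0]
      norm_num
      omega
    · rw [if_neg (by omega), if_neg (by omega)]
      exact h00
  have hmem2 : k2 ∈ f2.keys := by
    rw [hf2]
    refine (PySem.Dict.mem_keys_insert _ _ _ _).mpr (Or.inr ?_)
    rw [hf1]
    exact (PySem.Dict.mem_keys_insert _ _ _ _).mpr (Or.inr hk2mem)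
  rw [mbp_cleanup_noop f2 h002 hkeys2]
  rw [if_neg]
  · have hres := mbp_shrink2 a c1 f2 l r.toNat s.maxLen hlr' hrlen hc1win hkeys2 h002 ⟨k2, hmem2, hk2ge⟩
    have hcast : ((r.toNat : Int) + 1) = r + 1 := by omega
    rw [hcast] at hres
    exact ⟨hres.1, hres.2⟩
  · rw [mbp_minKey_eq_zero f2 (by omega) hkeys2]
    have h2 := mbp_maxKey_ge_two f2 k2 hmem2 hk2ge
    rintro (h | ⟨h, -⟩) <;> omega

theorem mbp_phase2 (a : List Int) (n : Int) (hn : n ≤ (a.length : Int)) :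
    ∀ (fuel : Nat) (r : Int) (s : MBPState), (n - r).toNat = fuel → 0 ≤ r → r ≤ n →
      MBPInv a s r →
      ((PySem.List.pyRange r n 1).foldl (mbpStep a) s).maxLen = s.maxLen := by
  intro fuel
  induction fuel with
  | zero =>
    intro r s hf h0 hrn hInv
    rw [PySem.List.pyRange_one_eq_nil (by omega)]
    rfl
  | succ m ih =>
    intro r s hf h0 hrn hInv
    by_cases hrn' : r < n
    · rw [PySem.List.pyRange_one_cons hrn']
      simp only [List.foldl_cons]
      obtain ⟨hml, hInv'⟩ := mbp_step2 a r s h0 (by omega) hInv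
      rw [ih (r+1) _ (by omega) (by omega) (by omega) hInv']
      exact hml
    · rw [PySem.List.pyRange_one_eq_nil (by omega)]
      rfl

-- state after i duplicate-free steps
def mbpS1 (a : List Int) (i : Nat) : MBPState :=
  ⟨PySem.Dict.mk ((a.take i).map (fun y => (y, (1 : Int)))),
   if i = 0 then PySem.Dict.mk [] else PySem.Dict.mk [(1, (i : Int)), (0, -(i : Int))],
   0, (i : Int)⟩

theorem mbp_get?_mk_map (xs : List Int) (hnd : xs.Nodup) (v : Int) :
    (PySem.Dict.mk (xs.map (fun y => (y, (1 : Int))))).get? v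
      = if v ∈ xs then some 1 else none := by
  induction xs with
  | nil => simp [PySem.Dict.get?]
  | cons x t ih =>
    simp only [List.map_cons, PySem.Dict.get?_mk_cons]
    rcases List.nodup_cons.mp hnd with ⟨hx, ht⟩
    by_cases hvx : v = x
    · simp [hvx]
    · simp only [show (x == v) = false from by simp [Ne.symm hvx], Bool.false_eq_true,
        if_false, ih ht, List.mem_cons, hvx, false_or]

theorem mbp_count_nodup (xs : List Int) (hnd : xs.Nodup) (v : Int) :
    xs.count v = if v ∈ xs then 1 else 0 := by
  by_cases hm : v ∈ xs
  · have h1 := List.nodup_iff_count_le_one.mp hnd v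
    have h2 := List.count_pos_iff.mpr hm
    rw [if_pos hm]
    omega
  · simp [List.count_eq_zero_of_not_mem hm, hm]

theorem mbp_phase1 (a : List Int) (n : Int) (hn : n ≤ (a.length : Int)) :
    ∀ (fuel : Nat) (i : Nat), (n - (i : Int)).toNat = fuel → (i : Int) ≤ n →
      (a.take i).Nodup →
      ((PySem.List.pyRange (i : Int) n 1).foldl (mbpStep a) (mbpS1 a i)).maxLen
        = mbpAltGo n a (a.take i) (i : Int) := by
  intro fuel
  induction fuel with
  | zero =>
    intro i hf hin hnd
    rw [PySem.List.pyRange_one_eq_nil (by omega), mbpAltGo, if_neg (by omega)]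
    simp only [List.foldl_nil, mbpS1]
    omega
  | succ fm ih =>
    intro i hf hin hnd
    by_cases hi : (i : Int) < n
    · have hilen : i < a.length := by omega
      have hx : (PySem.List.pyGet? a (i : Int)).getD 0 = a[i] := by
        rw [PySem.List.pyGet?_natCast]
        simp [List.getElem?_eq_getElem hilen]
      have htks : a.take (i+1) = a.take i ++ [a[i]] := by
        rw [List.take_add_one]
        simp [List.getElem?_eq_getElem hilen]
      have hgets : ∀ v : Int, (mbpS1 a i).counts.getD v 0 = if v ∈ a.take i then 1 else 0 := by
        intro v
        simp only [mbpS1, PySem.Dict.getD, mbp_get?_mk_map _ hnd v]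
        split <;> rfl
      rw [PySem.List.pyRange_one_cons hi, List.foldl_cons, mbpAltGo, if_pos hi]
      simp only [hx]
      by_cases hmem : a[i] ∈ a.take i
      · -- duplicate: A switches to shrink mode forever, B returns i
        have hi0 : i ≠ 0 := by
          intro h
          subst h
          simp at hmem
        rw [if_pos (by simpa [PySem.Set.contains] using hmem)]
        simp only [mbpStep, hx, mbpS1, if_neg hi0]
        set c1 := (PySem.Dict.mk ((a.take i).map (fun y => (y, (1:Int))))).insert (a[i])
          ((PySem.Dict.mk ((a.take i).map (fun y => (y, (1:Int))))).getD (a[i]) 0 + 1) with hc1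
        have hc1x : c1.getD (a[i]) 0 = 2 := by
          rw [hc1, PySem.Dict.getD_insert, if_pos rfl]
          have hmx := hgets (a[i])
          simp only [mbpS1] at hmx
          rw [hmx]
          simp [hmem]
        have hc1v : ∀ v : Int, c1.getD v 0
            = (((a.take (i+1)).drop 0).count v : Int) := by
          intro v
          rw [hc1, PySem.Dict.getD_insert]
          have hmv := hgets v
          have hmx := hgets (a[i])
          simp only [mbpS1] at hmv hmx
          simp only [List.drop_zero, htks, List.count_append, List.count_singleton,
            mbp_count_nodup _ hnd v]
          by_cases hv : v = a[i]
          · subst hv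
            rw [if_pos rfl, hmx]
            simp [hmem]
          · rw [if_neg hv, hmv]
            have hne : (a[i] == v) = false := beq_eq_false_iff_ne.mpr (Ne.symm hv)
            simp only [hne, Bool.false_eq_true, if_false, Nat.add_zero]
            by_cases hm2 : v ∈ a.take i <;> simp [hm2]
        rw [hc1x]
        norm_num
        -- freqs: [(1,i),(0,-i)] -> insert 2 -> insert 1
        have hf2lit : ((PySem.Dict.mk ([(1, (i:Int)), (0, -(i:Int))] : List (Int × Int))).insert 2
              ((PySem.Dict.mk ([(1, (i:Int)), (0, -(i:Int))] : List (Int × Int))).getD 2 0 + 1)).insert 1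
              (((PySem.Dict.mk ([(1, (i:Int)), (0, -(i:Int))] : List (Int × Int))).insert 2
                ((PySem.Dict.mk ([(1, (i:Int)), (0, -(i:Int))] : List (Int × Int))).getD 2 0 + 1)).getD 1 0 - 1)
            = PySem.Dict.mk ([(1, (i:Int) - 1), (0, -(i:Int)), (2, 1)] : List (Int × Int)) := by
          simp [PySem.Dict.insert, PySem.Dict.contains, PySem.Dict.getD, PySem.Dict.get?]
        simp only [hf2lit]
        have hkeysF : ∀ k ∈ (PySem.Dict.mk ([(1, (i:Int) - 1), (0, -(i:Int)), (2, 1)] : List (Int × Int))).keys, (0:Int) ≤ k := by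
          intro k hk
          simp [PySem.Dict.keys] at hk
          rcases hk with h | h | h <;> omega
        have h00F : (PySem.Dict.mk ([(1, (i:Int) - 1), (0, -(i:Int)), (2, 1)] : List (Int × Int))).getD 0 0 < 0 := by
          simp [PySem.Dict.getD, PySem.Dict.get?]
          omega
        rw [mbp_cleanup_noop _ h00F hkeysF]
        have hmaxF : mbpMaxKey (PySem.Dict.mk ([(1, (i:Int) - 1), (0, -(i:Int)), (2, 1)] : List (Int × Int))) = 2 := by
          simp only [mbpMaxKey, PySem.Dict.keys, List.map_cons, List.map_nil]
          decide
        have hminF : mbpMinKey (PySem.Dict.mk ([(1, (i:Int) - 1), (0, -(i:Int)), (2, 1)] : List (Int × Int))) = 0 := by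
          simp only [mbpMinKey, PySem.Dict.keys, List.map_cons, List.map_nil]
          decide
        rw [if_neg (by rw [hmaxF, hminF]; norm_num)]
        have hsh := mbp_shrink2 a c1
          (PySem.Dict.mk ([(1, (i:Int) - 1), (0, -(i:Int)), (2, 1)] : List (Int × Int)))
          0 i ((i : Nat) : Int) (Nat.zero_le i) hilen (by simpa using hc1v) hkeysF h00F
          ⟨2, by simp [PySem.Dict.keys], by norm_num⟩
        simp only [Nat.cast_zero] at hsh
        rw [mbp_phase2 a n hn ((n - ((i : Int) + 1)).toNat) ((i : Int) + 1) _ rfl (by omega)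
          (by omega) hsh.2]
        exact hsh.1
      · -- fresh element: state advances to mbpS1 a (i+1)
        have hcont : PySem.Set.contains (a.take i) (a[i]) = false := by
          simp [PySem.Set.contains]
          exact hmem
        have hadd : PySem.Set.add (a.take i) (a[i]) = a.take i ++ [a[i]] := by
          unfold PySem.Set.add
          rw [hcont]
          simp
        rw [hadd, ← htks]
        simp only [hcont, Bool.false_eq_true, if_false]
        have hnd' : (a.take (i+1)).Nodup := by
          rw [htks]
          exact List.Nodup.append hnd (List.nodup_singleton _) (by simpa using hmem)
        have hg0 : (PySem.Dict.mk ((a.take i).map (fun y => (y, (1:Int))))).getD (a[i]) 0 = 0 := by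
          have := hgets (a[i])
          simp only [mbpS1] at this
          rw [this, if_neg hmem]
        have hgc : (PySem.Dict.mk ((a.take i).map (fun y => (y, (1:Int))))).contains (a[i]) = false := by
          rw [PySem.Dict.contains_eq_isSome_get?, mbp_get?_mk_map _ hnd, if_neg hmem]
          rfl
        simp only [mbpStep, hx, mbpS1]
        have hc1eq : (PySem.Dict.mk ((a.take i).map (fun y => (y, (1:Int))))).insert (a[i])
              ((PySem.Dict.mk ((a.take i).map (fun y => (y, (1:Int))))).getD (a[i]) 0 + 1)
            = PySem.Dict.mk ((a.take (i+1)).map (fun y => (y, (1:Int)))) := by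
          simp only [hg0, PySem.Dict.insert, hgc, Bool.false_eq_true, if_false, htks,
            List.map_append, List.map_cons, List.map_nil]
          norm_num
        rw [hc1eq]
        have hcx1 : (PySem.Dict.mk ((a.take (i+1)).map (fun y => (y, (1:Int))))).getD (a[i]) 0 = 1 := by
          have h1 := mbp_get?_mk_map (a.take (i+1)) hnd' (a[i])
          have h2 : a[i] ∈ a.take (i+1) := by
            rw [htks]
            exact List.mem_append_right _ (by simp)
          simp only [PySem.Dict.getD, h1, if_pos h2]
          rfl
        rw [hcx1]
        by_cases hi0 : i = 0
        · subst hi0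
          rw [if_pos rfl]
          have hflit : ((PySem.Dict.mk ([] : List (Int × Int))).insert 1
                ((PySem.Dict.mk ([] : List (Int × Int))).getD 1 0 + 1)).insert (1 - 1)
                (((PySem.Dict.mk ([] : List (Int × Int))).insert 1
                  ((PySem.Dict.mk ([] : List (Int × Int))).getD 1 0 + 1)).getD (1 - 1) 0 - 1)
              = PySem.Dict.mk ([(1, (1:Int)), (0, (-1:Int))] : List (Int × Int)) := by
            simp [PySem.Dict.insert, PySem.Dict.contains, PySem.Dict.getD, PySem.Dict.get?]
          rw [hflit]
          have hkeysF : ∀ k ∈ (PySem.Dict.mk ([(1, (1:Int)), (0, (-1:Int))] : List (Int × Int))).keys, (0:Int) ≤ k := by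
            intro k hk
            simp [PySem.Dict.keys] at hk
            rcases hk with h | h <;> omega
          rw [mbp_cleanup_noop _ (by decide) hkeysF]
          rw [if_pos (Or.inl (by decide))]
          have hstate : (⟨PySem.Dict.mk ((a.take (0+1)).map (fun y => (y, (1:Int)))),
              PySem.Dict.mk ([(1, (1:Int)), (0, (-1:Int))] : List (Int × Int)), 0,
              max ((0:Nat) : Int) (((0:Nat) : Int) - 0 + 1)⟩ : MBPState) = mbpS1 a 1 := by
            simp only [mbpS1, if_neg (by decide : ¬ ((1:Nat) = 0)), MBPState.mk.injEq,
              PySem.Dict.mk.injEq, List.cons.injEq, Prod.mk.injEq]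
            push_cast
            and_intros <;> first | trivial | omega
          rw [hstate]
          have hih := ih 1 (by omega) (by omega) (by simpa using hnd')
          simpa using hih
        · rw [if_neg hi0]
          have hflit : ((PySem.Dict.mk ([(1, (i:Int)), (0, -(i:Int))] : List (Int × Int))).insert 1
                ((PySem.Dict.mk ([(1, (i:Int)), (0, -(i:Int))] : List (Int × Int))).getD 1 0 + 1)).insert (1 - 1)
                (((PySem.Dict.mk ([(1, (i:Int)), (0, -(i:Int))] : List (Int × Int))).insert 1
                  ((PySem.Dict.mk ([(1, (i:Int)), (0, -(i:Int))] : List (Int × Int))).getD 1 0 + 1)).getD (1 - 1) 0 - 1)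
              = PySem.Dict.mk ([(1, (i:Int) + 1), (0, -(i:Int) - 1)] : List (Int × Int)) := by
            simp [PySem.Dict.insert, PySem.Dict.contains, PySem.Dict.getD, PySem.Dict.get?]
          rw [hflit]
          have hkeysF : ∀ k ∈ (PySem.Dict.mk ([(1, (i:Int) + 1), (0, -(i:Int) - 1)] : List (Int × Int))).keys, (0:Int) ≤ k := by
            intro k hk
            simp [PySem.Dict.keys] at hk
            rcases hk with h | h <;> omega
          have h00F : (PySem.Dict.mk ([(1, (i:Int) + 1), (0, -(i:Int) - 1)] : List (Int × Int))).getD 0 0 < 0 := by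
            simp [PySem.Dict.getD, PySem.Dict.get?]
            omega
          rw [mbp_cleanup_noop _ h00F hkeysF]
          have hmaxF : mbpMaxKey (PySem.Dict.mk ([(1, (i:Int) + 1), (0, -(i:Int) - 1)] : List (Int × Int))) = 1 := by
            simp only [mbpMaxKey, PySem.Dict.keys, List.map_cons, List.map_nil]
            decide
          rw [if_pos (Or.inl hmaxF)]
          have hstate : (⟨PySem.Dict.mk ((a.take (i+1)).map (fun y => (y, (1:Int)))),
              PySem.Dict.mk ([(1, (i:Int) + 1), (0, -(i:Int) - 1)] : List (Int × Int)), 0,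
              max ((i:Nat) : Int) (((i:Nat) : Int) - 0 + 1)⟩ : MBPState) = mbpS1 a (i+1) := by
            simp only [mbpS1, if_neg (by omega : ¬ (i + 1 = 0)), MBPState.mk.injEq,
              PySem.Dict.mk.injEq, List.cons.injEq, Prod.mk.injEq]
            push_cast
            and_intros <;> first | trivial | omega
          rw [hstate]
          have hih := ih (i+1) (by omega) (by omega) hnd'
          have hcast : ((i+1 : Nat) : Int) = (i : Int) + 1 := by push_cast; ring
          rw [hcast] at hih
          exact hih
    · rw [PySem.List.pyRange_one_eq_nil (by omega), mbpAltGo, if_neg (by omega)]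
      simp only [List.foldl_nil, mbpS1]
      omega

-- ===== VERDICT (by name: the statement is the Claim_ definition above) =====
theorem max_boring_prefix_spec : Claim_equal_max_boring_prefix := by
  intro n a _hdom hpre
  unfold Spec_max_boring_prefix max_boring_prefix max_boring_prefix_alt
  by_cases hn : n ≤ 0
  · rw [PySem.List.pyRange_one_eq_nil hn]
    rw [mbpAltGo]
    simp only [List.foldl_nil]
    rw [if_neg (by omega)]
    omega
  · have h := mbp_phase1 a n hpre (n - 0).toNat 0 (by simp) (by omega) (by simp)
    simpa [mbpS1, PySem.Dict.empty, PySem.Set.empty] using h
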